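-- pv_equiv track=rewrite | github.com/dormanino/VariantCreatorTabajara | Parser/VariantGenerator.py | basic_combinations_generator
-- ===== SOURCE A (Python) =====
-- def basic_combinations_generator(code_groups):
--     _code_groups = code_groups.copy()
--
--     fixed_codes = []
--     for group in code_groups:
--         if len(group) == 1:
--             fixed_codes.append(group[0])
--             _code_groups.remove(group)
--
--     combinations = [fixed_codes]
--     for group in _code_groups:
--         expanded_combinations = []
--         for combination in combinations:
--             for code in group:
--                 expanded_combination = combination.copy()
--                 expanded_combination.append(code)
--                 expanded_combinations.append(expanded_combination)
--         combinations = expanded_combinations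
--
--     return combinations
-- ===== SOURCE B (Python) =====
-- def basic_combinations_generator(code_groups):
--     fixed_codes = [g[0] for g in code_groups if len(g) == 1]
--     variable = [g for g in code_groups if len(g) != 1]
--     total = 1
--     for g in variable:
--         total *= len(g)
--     result = []
--     for i in range(total):
--         chosen = []
--         k = i
--         for g in reversed(variable):
--             chosen.append(g[k % len(g)])
--             k //= len(g)
--         chosen.reverse()
--         result.append(fixed_codes + chosen)
--     return result
-- ===== Notes on version B (the rewrite author's own statement) =====
-- stated objective: alternative
-- what changed: Replaces A's remove-while-scanning partition and iterative list-expansion of the Cartesian product by a single filter-based partition plus mixed-radix ordinal decoding: each combination index i in range(prod of variable-group lengths) is decoded digit by digit (last group least significant) into its tuple.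
import Mathlib
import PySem

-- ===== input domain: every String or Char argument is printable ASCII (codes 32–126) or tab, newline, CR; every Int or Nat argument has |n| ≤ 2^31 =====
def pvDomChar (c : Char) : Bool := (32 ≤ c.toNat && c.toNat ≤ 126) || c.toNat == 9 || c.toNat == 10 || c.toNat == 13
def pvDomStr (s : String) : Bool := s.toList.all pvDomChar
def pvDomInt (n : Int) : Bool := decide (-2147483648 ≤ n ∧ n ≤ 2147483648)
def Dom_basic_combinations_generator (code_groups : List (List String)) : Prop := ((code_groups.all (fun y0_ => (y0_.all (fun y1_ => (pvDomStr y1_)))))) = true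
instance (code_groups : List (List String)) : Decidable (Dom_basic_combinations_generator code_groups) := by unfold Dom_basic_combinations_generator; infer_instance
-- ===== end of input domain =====

-- B replaces A's remove-while-scanning partition and iterative list expansion by a filter
-- partition plus mixed-radix ordinal decoding of each combination index (alternative algorithm).

-- ===== PORT A =====
-- first loop: state = (fixed_codes, _code_groups); 'group[0]' is guarded by len == 1 and
-- '_code_groups.remove(group)' always finds group, so '.getD' defaults are never taken.
def basic_combinations_generator (code_groups : List (List String)) : List (List String) :=
  let st := code_groups.foldl
    (fun (st : List String × List (List String)) group =>
      if group.length = 1 then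
        (st.1 ++ [PySem.List.pyGetD group 0 ""], (PySem.List.remove? st.2 group).getD st.2)
      else st)
    ([], code_groups)
  st.2.foldl
    (fun combinations group =>
      combinations.foldl
        (fun expanded combination =>
          group.foldl (fun e code => e ++ [combination ++ [code]]) expanded)
        [])
    [st.1]

-- ===== PORT B =====
-- inner loop of Source B: fold over reversed(variable) with state (chosen, k); k % len and
-- k // len via PySem.Int; 'g[k % len(g)]' is in range whenever the loop runs (total > 0).
def bcg_decode (variable_ : List (List String)) (i : Int) : List String :=
  let st := variable_.reverse.foldl
    (fun (st : List String × Int) g =>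
      (st.1 ++ [PySem.List.pyGetD g (PySem.Int.mod st.2 (g.length : Int)) ""],
       PySem.Int.floordiv st.2 (g.length : Int)))
    ([], i)
  st.1.reverse

def basic_combinations_generator_alt (code_groups : List (List String)) : List (List String) :=
  let fixed_codes := (code_groups.filter (fun g => g.length = 1)).map
    (fun g => PySem.List.pyGetD g 0 "")
  let variable_ := code_groups.filter (fun g => g.length ≠ 1)
  let total := variable_.foldl (fun t g => t * (g.length : Int)) 1
  (PySem.List.pyRange 0 total 1).map (fun i => fixed_codes ++ bcg_decode variable_ i)

-- ===== PRECONDITION & SPEC =====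
def Spec_basic_combinations_generator (code_groups : List (List String)) (out : List (List String)) : Prop := out = basic_combinations_generator_alt code_groups
instance (code_groups : List (List String)) (out : List (List String)) : Decidable (Spec_basic_combinations_generator code_groups out) := by unfold Spec_basic_combinations_generator; infer_instance

-- ===== CLAIM (what is proved, stated in full; the proofs are below) =====
def Claim_equal_basic_combinations_generator : Prop := ∀ (code_groups : List (List String)), Dom_basic_combinations_generator code_groups → Spec_basic_combinations_generator code_groups (basic_combinations_generator code_groups)

-- ===== LEMMAS AND PROOFS =====

-- The Cartesian product in A's order (right-most group varies fastest).
def pvProd (gs : List (List String)) : List (List String) :=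
  gs.foldr (fun g acc => g.flatMap (fun x => acc.map (x :: ·))) [[]]

-- removing an element not in the prefix removes the head of the suffix
theorem pv_remove_append_cons (pre l : List (List String)) (g : List String)
    (h : g ∉ pre) : PySem.List.remove? (pre ++ g :: l) g = some (pre ++ l) := by
  induction pre with
  | nil => simp
  | cons p pre ih =>
    have hne : p ≠ g := by intro e; exact h (e ▸ List.mem_cons_self)
    have : g ∉ pre := fun hm => h (List.mem_cons_of_mem _ hm)
    simp [PySem.List.remove?_cons_of_ne _ hne, ih this]

-- A's first loop = partition by filter
theorem pv_fixed_loop (l : List (List String)) (acc : List String)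
    (pre : List (List String)) (hpre : ∀ g ∈ pre, g.length ≠ 1) :
    l.foldl
      (fun (st : List String × List (List String)) group =>
        if group.length = 1 then
          (st.1 ++ [PySem.List.pyGetD group 0 ""], (PySem.List.remove? st.2 group).getD st.2)
        else st)
      (acc, pre ++ l)
    = (acc ++ (l.filter (fun g => g.length = 1)).map (fun g => PySem.List.pyGetD g 0 ""),
       pre ++ l.filter (fun g => g.length ≠ 1)) := by
  induction l generalizing acc pre with
  | nil => simp
  | cons g l ih =>
    by_cases h1 : g.length = 1
    · have hnm : g ∉ pre := fun hm => (hpre g hm) h1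
      rw [List.foldl_cons]
      simp only [if_pos h1, pv_remove_append_cons pre l g hnm, Option.getD_some]
      rw [ih (acc ++ [PySem.List.pyGetD g 0 ""]) pre hpre]
      simp [h1]
    · rw [List.foldl_cons]
      simp only [if_neg h1]
      have : pre ++ g :: l = (pre ++ [g]) ++ l := by simp
      rw [this, ih acc (pre ++ [g]) (by
        intro x hx
        rcases List.mem_append.mp hx with h | h
        · exact hpre x h
        · simp at h; subst h; exact h1)]
      simp [h1]

-- flatMap of singletons is map
theorem pv_flatMap_singleton {α β : Type} (l : List α) (f : α → β) :
    l.flatMap (fun x => [f x]) = l.map f := by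
  induction l with
  | nil => rfl
  | cons x l ih => simp [List.flatMap_cons, ih]

-- accumulate-append fold is flatMap
theorem pv_foldl_snoc {α β : Type} (l : List α) (f : α → List β) (e0 : List β) :
    l.foldl (fun e x => e ++ f x) e0 = e0 ++ l.flatMap f := by
  induction l generalizing e0 with
  | nil => simp
  | cons x l ih => simp [ih, List.flatMap_cons]

-- one expansion step of A's main loop is a flatMap
theorem pv_expand_step (combinations : List (List String)) (g : List String)
    (e0 : List (List String)) :
    combinations.foldl
      (fun expanded combination =>
        g.foldl (fun e code => e ++ [combination ++ [code]]) expanded)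
      e0
    = e0 ++ combinations.flatMap (fun c => g.map (fun code => c ++ [code])) := by
  induction combinations generalizing e0 with
  | nil => simp
  | cons c cs ih =>
    rw [List.foldl_cons, pv_foldl_snoc g (fun code => [c ++ [code]]) e0, ih,
      pv_flatMap_singleton]
    simp [List.flatMap_cons]

-- A's main loop computes (pvProd gs) prefixed by each accumulator element
theorem pv_main_loop (gs : List (List String)) (acc : List (List String)) :
    gs.foldl
      (fun combinations group =>
        combinations.foldl
          (fun expanded combination =>
            group.foldl (fun e code => e ++ [combination ++ [code]]) expanded)
          [])
      acc
    = acc.flatMap (fun c => (pvProd gs).map (c ++ ·)) := by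
  induction gs generalizing acc with
  | nil => simp [pvProd]
  | cons g gs ih =>
    rw [List.foldl_cons, pv_expand_step acc g [], List.nil_append, ih]
    show _ = acc.flatMap (fun c => (g.flatMap (fun x => (pvProd gs).map (x :: ·))).map (c ++ ·))
    simp [List.flatMap_assoc, List.flatMap_map, List.map_flatMap, List.map_map,
      List.append_assoc, Function.comp_def]

-- pvProd with an arbitrary base list
theorem pv_prod_foldr_base (gs : List (List String)) (B : List (List String)) :
    gs.foldr (fun g acc => g.flatMap (fun x => acc.map (x :: ·))) B
    = (pvProd gs).flatMap (fun t => B.map (t ++ ·)) := by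
  induction gs with
  | nil => simp [pvProd]
  | cons g gs ih =>
    show g.flatMap (fun x => (gs.foldr _ B).map (x :: ·)) = _
    rw [ih]
    show _ = (g.flatMap (fun x => (pvProd gs).map (x :: ·))).flatMap (fun t => B.map (t ++ ·))
    simp [List.flatMap_assoc, List.flatMap_map, List.map_flatMap, List.map_map,
      Function.comp_def]

theorem pv_prod_snoc (gs : List (List String)) (g : List String) :
    pvProd (gs ++ [g]) = (pvProd gs).flatMap (fun t => g.map (fun x => t ++ [x])) := by
  have hbase : pvProd (gs ++ [g])
      = gs.foldr (fun g acc => g.flatMap (fun x => acc.map (x :: ·)))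
          (g.flatMap (fun x => [[]].map (x :: ·))) := by
    simp [pvProd, List.foldr_append]
  rw [hbase, pv_prod_foldr_base]
  apply List.flatMap_congr
  intro t _
  simp only [List.map_singleton, pv_flatMap_singleton, List.map_map, Function.comp_def]

-- the chosen-list component of B's inner fold is append-accumulated
theorem pv_decode_fold_fst (l : List (List String)) (c0 : List String) (k : Int) :
    (l.foldl
      (fun (st : List String × Int) g =>
        (st.1 ++ [PySem.List.pyGetD g (PySem.Int.mod st.2 (g.length : Int)) ""],
         PySem.Int.floordiv st.2 (g.length : Int)))
      (c0, k)).1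
    = c0 ++ (l.foldl
      (fun (st : List String × Int) g =>
        (st.1 ++ [PySem.List.pyGetD g (PySem.Int.mod st.2 (g.length : Int)) ""],
         PySem.Int.floordiv st.2 (g.length : Int)))
      ([], k)).1 := by
  induction l generalizing c0 k with
  | nil => simp
  | cons g l ih =>
    show (l.foldl _
        (c0 ++ [PySem.List.pyGetD g (PySem.Int.mod k (g.length : Int)) ""],
         PySem.Int.floordiv k (g.length : Int))).1
      = c0 ++ (l.foldl _
        ([] ++ [PySem.List.pyGetD g (PySem.Int.mod k (g.length : Int)) ""],
         PySem.Int.floordiv k (g.length : Int))).1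
    rw [ih, ih ([] ++ [PySem.List.pyGetD g (PySem.Int.mod k (g.length : Int)) ""])]
    simp

theorem pv_decode_snoc (gs : List (List String)) (g : List String) (i : Int) :
    bcg_decode (gs ++ [g]) i
    = bcg_decode gs (PySem.Int.floordiv i (g.length : Int))
      ++ [PySem.List.pyGetD g (PySem.Int.mod i (g.length : Int)) ""] := by
  unfold bcg_decode
  rw [List.reverse_append, List.reverse_singleton, List.singleton_append, List.foldl_cons]
  show (gs.reverse.foldl
      (fun (st : List String × Int) g =>
        (st.1 ++ [PySem.List.pyGetD g (PySem.Int.mod st.2 (g.length : Int)) ""],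
         PySem.Int.floordiv st.2 (g.length : Int)))
      ([] ++ [PySem.List.pyGetD g (PySem.Int.mod i (g.length : Int)) ""],
       PySem.Int.floordiv i (g.length : Int))).1.reverse
    = (gs.reverse.foldl
      (fun (st : List String × Int) g =>
        (st.1 ++ [PySem.List.pyGetD g (PySem.Int.mod st.2 (g.length : Int)) ""],
         PySem.Int.floordiv st.2 (g.length : Int)))
      ([], PySem.Int.floordiv i (g.length : Int))).1.reverse
      ++ [PySem.List.pyGetD g (PySem.Int.mod i (g.length : Int)) ""]
  rw [pv_decode_fold_fst]
  simp

def pvLenProd (gs : List (List String)) : Nat := (gs.map List.length).prod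

-- range(n*m) decomposed into quotient and remainder digits
theorem pv_range_mul {β : Type} (n m : Nat) (f : Nat → β) :
    (List.range (n * m)).map f
    = (List.range n).flatMap (fun q => (List.range m).map (fun r => f (q * m + r))) := by
  induction n with
  | zero => simp
  | succ n ih =>
    have : (n + 1) * m = n * m + m := by ring
    rw [this, List.range_add, List.map_append, ih, List.range_succ, List.flatMap_append]
    simp [List.map_map, Nat.mul_comm]

-- mapping an index function over range(len g) enumerates g
theorem pv_map_range_getD {α β : Type} (g : List α) (d : α) (h : α → β) :
    (List.range g.length).map (fun r => h (g.getD r d)) = g.map h := by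
  induction g with
  | nil => simp
  | cons a g ih =>
    rw [List.length_cons, List.range_succ_eq_map, List.map_cons, List.map_map]
    simp only [Function.comp_def, List.getD_cons_zero, List.getD_cons_succ]
    rw [ih, List.map_cons]

-- B's decoding enumerates pvProd
theorem pv_decode_enum (gs : List (List String)) :
    (List.range (pvLenProd gs)).map (fun (k : Nat) => bcg_decode gs (k : Int)) = pvProd gs := by
  induction gs using List.reverseRecOn with
  | nil => simp [pvLenProd, pvProd, bcg_decode]
  | append_singleton gs g ih =>
    have hp : pvLenProd (gs ++ [g]) = pvLenProd gs * g.length := by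
      simp [pvLenProd]
    rw [hp, pv_range_mul, pv_prod_snoc, ← ih, List.flatMap_map]
    apply List.flatMap_congr
    intro q hq
    by_cases hm : g.length = 0
    · rw [List.eq_nil_iff_length_eq_zero.mpr hm] at *
      simp [hm]
    · have hmpos : 0 < g.length := Nat.pos_of_ne_zero hm
      have hmap : ∀ r ∈ List.range g.length,
          bcg_decode (gs ++ [g]) ((q * g.length + r : Nat) : Int)
          = bcg_decode gs ((q : Nat) : Int) ++ [g.getD r ""] := by
        intro r hr
        have hrlt : r < g.length := List.mem_range.mp hr
        rw [pv_decode_snoc]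
        rw [show ((q * g.length + r : Nat) : Int) = (((q * g.length + r : Nat) : Nat) : Int) from rfl]
        rw [PySem.Int.floordiv_natCast, PySem.Int.mod_natCast]
        have hdiv : (q * g.length + r) / g.length = q := by
          rw [Nat.mul_comm, Nat.mul_add_div hmpos, Nat.div_eq_of_lt hrlt]
          omega
        have hmod : (q * g.length + r) % g.length = r := by
          rw [Nat.mul_comm, Nat.mul_add_mod, Nat.mod_eq_of_lt hrlt]
        rw [hdiv, hmod, PySem.List.pyGetD_natCast]
      rw [List.map_congr_left hmap]
      rw [show (fun r => bcg_decode gs ((q : Nat) : Int) ++ [g.getD r ""])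
            = (fun r => (fun x => bcg_decode gs ((q : Nat) : Int) ++ [x]) (g.getD r "")) from rfl]
      exact pv_map_range_getD g "" (fun x => bcg_decode gs ((q : Nat) : Int) ++ [x])

-- the Int product accumulated by B's total loop is the Nat product, cast
theorem pv_total_eq (gs : List (List String)) (t : Int) :
    gs.foldl (fun t g => t * (g.length : Int)) t = t * (pvLenProd gs : Nat) := by
  induction gs generalizing t with
  | nil => simp [pvLenProd]
  | cons g gs ih => simp [pvLenProd, ih]; ring

-- ===== VERDICT (by name: the statement is the Claim_ definition above) =====
-- the first loop started on the full list
theorem pv_fixed_loop' (l : List (List String)) :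
    l.foldl
      (fun (st : List String × List (List String)) group =>
        if group.length = 1 then
          (st.1 ++ [PySem.List.pyGetD group 0 ""], (PySem.List.remove? st.2 group).getD st.2)
        else st)
      ([], l)
    = ((l.filter (fun g => g.length = 1)).map (fun g => PySem.List.pyGetD g 0 ""),
       l.filter (fun g => g.length ≠ 1)) := by
  have h := pv_fixed_loop l [] [] (by simp)
  simpa using h

theorem pv_A_closed (cg : List (List String)) :
    basic_combinations_generator cg
    = (pvProd (cg.filter (fun g => g.length ≠ 1))).map
        ((cg.filter (fun g => g.length = 1)).map (fun g => PySem.List.pyGetD g 0 "") ++ ·) := by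
  show ((cg.foldl
      (fun (st : List String × List (List String)) group =>
        if group.length = 1 then
          (st.1 ++ [PySem.List.pyGetD group 0 ""], (PySem.List.remove? st.2 group).getD st.2)
        else st)
      ([], cg)).2.foldl
      (fun combinations group =>
        combinations.foldl
          (fun expanded combination =>
            group.foldl (fun e code => e ++ [combination ++ [code]]) expanded)
          [])
      [(cg.foldl
      (fun (st : List String × List (List String)) group =>
        if group.length = 1 then
          (st.1 ++ [PySem.List.pyGetD group 0 ""], (PySem.List.remove? st.2 group).getD st.2)
        else st)
      ([], cg)).1]) = _
  rw [pv_fixed_loop', pv_main_loop]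
  simp

theorem pv_B_closed (cg : List (List String)) :
    basic_combinations_generator_alt cg
    = (pvProd (cg.filter (fun g => g.length ≠ 1))).map
        ((cg.filter (fun g => g.length = 1)).map (fun g => PySem.List.pyGetD g 0 "") ++ ·) := by
  show (PySem.List.pyRange 0
      ((cg.filter (fun g => g.length ≠ 1)).foldl (fun t g => t * (g.length : Int)) 1) 1).map
      (fun i => (cg.filter (fun g => g.length = 1)).map (fun g => PySem.List.pyGetD g 0 "")
        ++ bcg_decode (cg.filter (fun g => g.length ≠ 1)) i) = _
  rw [pv_total_eq, one_mul, PySem.List.pyRange_zero_nat, List.map_map]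
  rw [← pv_decode_enum (cg.filter (fun g => g.length ≠ 1)), List.map_map]
  simp [Function.comp_def]

theorem basic_combinations_generator_spec : Claim_equal_basic_combinations_generator := by
  intro cg _
  unfold Spec_basic_combinations_generator
  rw [pv_A_closed, pv_B_closed]
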